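-- pv_equiv track=rewrite | github.com/kirtivr/leetcode | Leetcode/2380.py | isInCorrectForm
-- ===== SOURCE A (Python) =====
-- def isInCorrectForm(s:str) -> bool:
--     idx = 0
--     while idx < len(s) and s[idx] == "1":
--         idx += 1
--
--     while idx < len(s) and s[idx] == "0":
--         idx += 1
--
--     if idx == len(s):
--         return True
--     return False
-- ===== SOURCE B (Python) =====
-- def isInCorrectForm(s: str) -> bool:
--     return set(s) <= {'0', '1'} and '01' not in s
-- ===== Notes on version B (the rewrite author's own statement) =====
-- stated objective: simpler
-- what changed: Replaces the two index-advancing while loops with a declarative check: the string is binary-only and contains no '01' substring (no rising edge), so all 1s precede all 0s.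
import Mathlib
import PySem

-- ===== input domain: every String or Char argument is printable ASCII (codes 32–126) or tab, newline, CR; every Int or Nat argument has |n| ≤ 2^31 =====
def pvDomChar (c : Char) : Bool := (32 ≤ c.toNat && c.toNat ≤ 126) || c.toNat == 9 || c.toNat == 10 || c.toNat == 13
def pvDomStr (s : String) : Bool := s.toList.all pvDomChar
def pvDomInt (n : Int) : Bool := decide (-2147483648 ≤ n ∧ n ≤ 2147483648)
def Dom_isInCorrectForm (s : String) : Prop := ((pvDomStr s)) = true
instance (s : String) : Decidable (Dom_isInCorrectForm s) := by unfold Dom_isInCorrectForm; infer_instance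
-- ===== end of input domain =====

-- B is simpler: binary-only and no '01' substring replaces A's two index-advancing scan loops.

-- ===== PORT A =====
-- first while loop: advance idx while s[idx] == '1'  (the remaining suffix replaces the index)
def pvSkipOnes : List Char → List Char
  | [] => []
  | c :: rest => if c == '1' then pvSkipOnes rest else c :: rest

-- second while loop: advance idx while s[idx] == '0'
def pvSkipZeros : List Char → List Char
  | [] => []
  | c :: rest => if c == '0' then pvSkipZeros rest else c :: rest

-- 'idx == len(s)' ↔ the remaining suffix is empty
def isInCorrectForm (s : String) : Bool :=
  (pvSkipZeros (pvSkipOnes s.toList)).isEmpty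

-- ===== PORT B =====
-- set(s) <= {'0','1'} and '01' not in s
def isInCorrectForm_alt (s : String) : Bool :=
  PySem.Set.issubset (PySem.Set.ofList s.toList) ['0', '1'] && !(PySem.Str.isIn "01" s)

-- ===== PRECONDITION & SPEC =====
def Spec_isInCorrectForm (s : String) (out : Bool) : Prop := out = isInCorrectForm_alt s
instance (s : String) (out : Bool) : Decidable (Spec_isInCorrectForm s out) := by unfold Spec_isInCorrectForm; infer_instance

-- ===== CLAIM (what is proved, stated in full; the proofs are below) =====
def Claim_equal_isInCorrectForm : Prop := ∀ (s : String), Dom_isInCorrectForm s → Spec_isInCorrectForm s (isInCorrectForm s)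

-- ===== LEMMAS AND PROOFS =====

-- the common characterization: every char is '0' or '1', and no '0' immediately followed by '1'
def pvQ (l : List Char) : Prop := (∀ c ∈ l, c = '0' ∨ c = '1') ∧ ¬ (['0', '1'] <:+: l)

theorem pvInfix_cons_one {r : List Char} :
    (['0', '1'] <:+: ('1' :: r)) ↔ (['0', '1'] <:+: r) := by
  rw [List.infix_cons_iff]
  constructor
  · rintro (h | h)
    · rcases h with ⟨t, ht⟩; simp at ht
    · exact h
  · exact Or.inr

theorem pvInfix_zero_cons {r : List Char} (h : ['0', '1'] <:+: ('0' :: r)) :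
    ¬ (['0', '1'] <:+: ('0' :: '0' :: r)) → False := by
  intro hn
  exact hn (h.trans (List.suffix_cons '0' ('0' :: r)).isInfix)

theorem pvAllZero_of_Q : ∀ r : List Char,
    (∀ c ∈ r, c = '0' ∨ c = '1') → ¬ (['0', '1'] <:+: ('0' :: r)) →
    r.all (fun c => c == '0') = true := by
  intro r
  induction r with
  | nil => intro _ _; rfl
  | cons c t ih =>
    intro hall hinf
    rcases hall c (List.mem_cons_self ..) with h0 | h1
    · subst h0
      simp only [List.all_cons, Bool.and_eq_true, beq_self_eq_true, true_and]
      exact ih (fun x hx => hall x (List.mem_cons_of_mem _ hx))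
        (fun h => pvInfix_zero_cons h hinf)
    · subst h1
      exact absurd (⟨[], t, rfl⟩ : ['0', '1'] <:+: ('0' :: '1' :: t)) hinf

theorem pvNotInfix_of_allZero {r : List Char}
    (h : r.all (fun c => c == '0') = true) : ¬ (['0', '1'] <:+: ('0' :: r)) := by
  intro hinf
  have h1 : '1' ∈ ('0' :: r) := hinf.mem (by simp)
  have h2 : '1' ∈ r := by simpa using h1
  have := List.all_eq_true.mp h '1' h2
  simp at this

theorem pvSkipZeros_isEmpty : ∀ r : List Char,
    (pvSkipZeros r).isEmpty = r.all (fun c => c == '0') := by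
  intro r
  induction r with
  | nil => rfl
  | cons c t ih =>
    by_cases hc : c = '0'
    · subst hc; simpa [pvSkipZeros] using ih
    · simp [pvSkipZeros, hc]

theorem pvA_iff_Q : ∀ l : List Char,
    (pvSkipZeros (pvSkipOnes l)).isEmpty = true ↔ pvQ l := by
  intro l
  induction l with
  | nil =>
    simp only [pvSkipOnes, pvSkipZeros, List.isEmpty_nil, pvQ]
    simp
  | cons c t ih =>
    by_cases h1 : c = '1'
    · subst h1
      have e : pvSkipOnes ('1' :: t) = pvSkipOnes t := by simp [pvSkipOnes]
      rw [e, ih]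
      unfold pvQ
      rw [pvInfix_cons_one]
      constructor
      · rintro ⟨ha, hb⟩
        refine ⟨fun x hx => ?_, hb⟩
        rcases List.mem_cons.mp hx with rfl | hx
        · exact Or.inr rfl
        · exact ha x hx
      · rintro ⟨ha, hb⟩
        exact ⟨fun x hx => ha x (List.mem_cons_of_mem _ hx), hb⟩
    · by_cases h0 : c = '0'
      · subst h0
        have : pvSkipOnes ('0' :: t) = '0' :: t := by simp [pvSkipOnes]
        rw [this]
        have : pvSkipZeros ('0' :: t) = pvSkipZeros t := by simp [pvSkipZeros]
        rw [this, pvSkipZeros_isEmpty]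
        unfold pvQ
        constructor
        · intro hall
          refine ⟨?_, pvNotInfix_of_allZero hall⟩
          intro x hx
          rcases List.mem_cons.mp hx with rfl | hx
          · exact Or.inl rfl
          · exact Or.inl (by simpa using List.all_eq_true.mp hall x hx)
        · rintro ⟨ha, hb⟩
          exact pvAllZero_of_Q t (fun x hx => ha x (List.mem_cons_of_mem _ hx)) hb
      · have e1 : pvSkipOnes (c :: t) = c :: t := by simp [pvSkipOnes, h1]
        have e2 : pvSkipZeros (c :: t) = c :: t := by simp [pvSkipZeros, h0]
        rw [e1, e2]
        simp only [List.isEmpty_cons, pvQ]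
        constructor
        · intro h; cases h
        · rintro ⟨ha, _⟩
          rcases ha c (List.mem_cons_self ..) with h | h
          · exact absurd h h0
          · exact absurd h h1

theorem pvB_iff_Q (s : String) : isInCorrectForm_alt s = true ↔ pvQ s.toList := by
  unfold isInCorrectForm_alt pvQ
  rw [Bool.and_eq_true, Bool.not_eq_true', PySem.Set.issubset_iff,
    PySem.Str.isIn_eq, PySem.Chars.isIn_eq_false_iff]
  constructor
  · rintro ⟨ha, hb⟩
    refine ⟨fun c hc => ?_, by simpa using hb⟩
    have := ha c ((PySem.Set.mem_ofList _ _).mpr hc)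
    simpa using this
  · rintro ⟨ha, hb⟩
    refine ⟨fun c hc => ?_, by simpa using hb⟩
    have := ha c ((PySem.Set.mem_ofList _ _).mp hc)
    simpa using this

-- ===== VERDICT (by name: the statement is the Claim_ definition above) =====
theorem isInCorrectForm_spec : Claim_equal_isInCorrectForm := by
  intro s _
  unfold Spec_isInCorrectForm
  rw [Bool.eq_iff_iff]
  unfold isInCorrectForm
  rw [pvA_iff_Q, pvB_iff_Q]
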